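-- pv_equiv track=rewrite | github.com/KamalTD/Important_Scripts | get_file_padding.py | get_padding
-- ===== SOURCE A (Python) =====
-- def get_padding(file = ""):
--
--
--     file = file.split(".")[0]
--
--     file_name = file
--
--     list = []
--
--     for char in file:
--
--         list.append(char)
--
--     list.reverse()
--
--     digit_count = 0
--
--
--
--     for num in list:
--
--         try:
--
--             int(num)
--
--             digit_count += 1
--
--
--         except:
--
--             break
--
--     return digit_count,file_name
-- ===== SOURCE B (Python) =====
-- import re
--
-- def get_padding(file=""):
--     stem = file.split(".")[0]
--     return len(re.search(r"\d*\Z", stem).group()), stem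
-- ===== Notes on version B (the rewrite author's own statement) =====
-- stated objective: idiomatic
-- what changed: Replaces building a char list, reversing it and scanning with try/except int() by a single regex match of the trailing digit run on the stem.
import Mathlib
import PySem

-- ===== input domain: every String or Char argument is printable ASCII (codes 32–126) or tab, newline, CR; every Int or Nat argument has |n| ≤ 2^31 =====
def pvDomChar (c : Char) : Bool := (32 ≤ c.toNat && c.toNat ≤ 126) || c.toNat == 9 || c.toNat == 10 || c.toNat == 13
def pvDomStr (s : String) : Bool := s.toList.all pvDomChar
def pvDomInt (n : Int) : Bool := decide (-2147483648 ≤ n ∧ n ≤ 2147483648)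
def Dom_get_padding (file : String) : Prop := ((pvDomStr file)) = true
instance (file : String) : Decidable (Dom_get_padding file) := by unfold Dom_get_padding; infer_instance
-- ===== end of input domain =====

-- B replaces A's reversed-char-list loop with try/except int() by a regex match of the
-- trailing digit run on the stem (idiomatic; same asymptotic cost).


-- ===== PORT A =====
-- the 'for num in list: try: int(num); digit_count += 1 except: break' loop:
-- counts leading chars of the (already reversed) list on which int(char) succeeds, stops at the first failure
def pvCountA : List Char → Int
  | [] => 0
  | c :: rest =>
    match PySem.Int.ofStr? (String.ofList [c]) with
    | some _ => 1 + pvCountA rest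
    | none => 0

def get_padding (file : String) : Int × String :=
  let stem := ((PySem.Str.split? file ".").getD []).headD ""   -- file = file.split(".")[0]
  let file_name := stem
  let l := stem.toList                                          -- list built char by char
  let rl := l.reverse                                           -- list.reverse()
  (pvCountA rl, file_name)

-- ===== PORT B =====
-- hand port of re.search(r"\d*\Z", stem).group(): the trailing run of decimal digits of stem,
-- i.e. the longest digit prefix of the reversed char list; exact on the ASCII domain, where
-- \d coincides with PySem.Chars.isdigit ('0'..'9')
def get_padding_alt (file : String) : Int × String :=
  let stem := ((PySem.Str.split? file ".").getD []).headD ""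
  ((((stem.toList.reverse.takeWhile PySem.Chars.isdigit).length : Int)), stem)

-- ===== PRECONDITION & SPEC =====
def Spec_get_padding (file : String) (out : Int × String) : Prop := out = get_padding_alt file
instance (file : String) (out : Int × String) : Decidable (Spec_get_padding file out) := by unfold Spec_get_padding; infer_instance

-- ===== CLAIM (what is proved, stated in full; the proofs are below) =====
def Claim_equal_get_padding : Prop := ∀ (file : String), Dom_get_padding file → Spec_get_padding file (get_padding file)

-- ===== LEMMAS AND PROOFS =====

-- on a single domain character, int(c) succeeds exactly when c is an ASCII decimal digit
theorem pvOfChars_isdigit (c : Char) (hd : c.toNat ≤ 126) :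
    (PySem.Int.ofChars? [c]).isSome = PySem.Chars.isdigit c := by
  have key : ∀ n : Fin 127, (PySem.Int.ofChars? [Char.ofNat n.val]).isSome
      = PySem.Chars.isdigit (Char.ofNat n.val) := by decide
  have h2 := key ⟨c.toNat, by omega⟩
  have h3 : Char.ofNat c.toNat = c := Char.ofNat_toNat c
  simpa [h3] using h2

-- A's break-at-first-failure count equals the takeWhile-isdigit length, on domain characters
theorem pvCountA_eq (l : List Char) (hd : ∀ c ∈ l, pvDomChar c = true) :
    pvCountA l = ((l.takeWhile PySem.Chars.isdigit).length : Int) := by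
  induction l with
  | nil => simp [pvCountA]
  | cons c rest ih =>
    have hc : c.toNat ≤ 126 := by
      have := hd c (by simp)
      simp [pvDomChar] at this
      omega
    have hdig := pvOfChars_isdigit c hc
    have hrest : ∀ x ∈ rest, pvDomChar x = true := fun x hx => hd x (by simp [hx])
    by_cases h : PySem.Chars.isdigit c = true
    · obtain ⟨v, hv⟩ : ∃ v, PySem.Int.ofChars? [c] = some v := by
        rw [h] at hdig
        exact Option.isSome_iff_exists.mp hdig
      simp [pvCountA, PySem.Int.ofStr?, hv, List.takeWhile, h, ih hrest]
      omega
    · have hn : PySem.Int.ofChars? [c] = none := by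
        rw [eq_false_of_ne_true h] at hdig
        exact Option.not_isSome_iff_eq_none.mp (by simp [hdig])
      simp [pvCountA, PySem.Int.ofStr?, hn, List.takeWhile, eq_false_of_ne_true h]

-- every character of any piece of splitOn.go comes from the input, the current chunk or the accumulator
theorem pvGoChars (sep : List Char) (fuel : Nat) :
    ∀ (l cur : List Char) (acc : List (List Char)),
      ∀ p ∈ PySem.Chars.splitOn.go sep fuel l cur acc, ∀ c ∈ p,
        c ∈ l ∨ c ∈ cur ∨ ∃ q ∈ acc, c ∈ q := by
  induction fuel with
  | zero =>
    intro l cur acc p hp c hc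
    simp [PySem.Chars.splitOn.go] at hp
    rcases hp with h | h
    · exact Or.inr (Or.inr ⟨p, h, hc⟩)
    · subst h; simp at hc
      rcases hc with h | h
      · exact Or.inr (Or.inl h)
      · exact Or.inl h
  | succ fuel ih =>
    intro l cur acc p hp c hc
    match l with
    | [] =>
      simp [PySem.Chars.splitOn.go] at hp
      rcases hp with h | h
      · exact Or.inr (Or.inr ⟨p, h, hc⟩)
      · subst h; simp at hc; exact Or.inr (Or.inl hc)
    | x :: rest =>
      rw [PySem.Chars.splitOn.go] at hp
      by_cases hpre : sep.isPrefixOf (x :: rest) = true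
      · simp only [hpre, if_true] at hp
        rcases ih _ _ _ p hp c hc with h | h | h
        · exact Or.inl (List.drop_subset _ _ h)
        · simp at h
        · rcases h with ⟨q, hq, hcq⟩
          simp at hq
          rcases hq with h | h
          · subst h; simp at hcq; exact Or.inr (Or.inl hcq)
          · exact Or.inr (Or.inr ⟨q, h, hcq⟩)
      · simp only [hpre] at hp
        rcases ih _ _ _ p hp c hc with h | h | h
        · exact Or.inl (by simp [h])
        · simp at h
          rcases h with h | h
          · subst h; exact Or.inl (by simp)
          · exact Or.inr (Or.inl h)
        · exact Or.inr (Or.inr h)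

theorem pvSplitOnChars (s sep : List Char) (p : List Char) (hp : p ∈ PySem.Chars.splitOn s sep)
    (c : Char) (hc : c ∈ p) : c ∈ s := by
  have := pvGoChars sep (s.length + 1) s [] [] p hp c hc
  rcases this with h | h | h
  · exact h
  · simp at h
  · simp at h

-- the stem computed by both ports has all its characters drawn from file
theorem pvStemDom (file : String) (hdom : pvDomStr file = true) :
    ∀ c ∈ (((PySem.Str.split? file ".").getD []).headD "").toList, pvDomChar c = true := by
  intro c hc
  simp [PySem.Str.split?, PySem.Chars.split?] at hc
  rcases hps : PySem.Chars.splitOn file.toList ['.'] with _ | ⟨p, ps⟩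
  · simp [hps] at hc
  · simp [hps] at hc
    have hmem : c ∈ file.toList := pvSplitOnChars _ _ p (by rw [hps]; exact List.mem_cons_self) c hc
    simp [pvDomStr, List.all_eq_true] at hdom
    exact hdom c hmem

-- ===== VERDICT (by name: the statement is the Claim_ definition above) =====
theorem get_padding_spec : Claim_equal_get_padding := by
  intro file hdom
  unfold Spec_get_padding get_padding get_padding_alt
  have hstem := pvStemDom file hdom
  have hrev : ∀ c ∈ (((PySem.Str.split? file ".").getD []).headD "").toList.reverse,
      pvDomChar c = true := by
    intro c hc; exact hstem c (List.mem_reverse.mp hc)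
  simp only [Prod.mk.injEq]
  exact ⟨pvCountA_eq _ hrev, trivial⟩
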